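-- pv_equiv track=rewrite | github.com/JimmyR714/steg-experiment-3b | main.py | _pack_payload
-- ===== SOURCE A (Python) =====
-- def _pack_payload(text: str) -> list[int]:
--     """Encode a UTF-8 string into a bit vector with a 16-bit length header."""
--     raw = text.encode("utf-8")
--     n = len(raw)
--     bits: list[int] = []
--     for shift in range(15, -1, -1):
--         bits.append((n >> shift) & 1)
--     for byte in raw:
--         for shift in range(7, -1, -1):
--             bits.append((byte >> shift) & 1)
--     return bits
-- ===== SOURCE B (Python) =====
-- def _pack_payload(text: str) -> list[int]:
--     """Encode a UTF-8 string into a bit vector with a 16-bit length header."""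
--     raw = text.encode("utf-8")
--     s = f"{len(raw) & 0xFFFF:016b}" + "".join(f"{b:08b}" for b in raw)
--     return [int(c) for c in s]
-- ===== Notes on version B (the rewrite author's own statement) =====
-- stated objective: idiomatic
-- what changed: Replaces the shift-and-mask bit loops with binary string formatting: a 016b header of the masked length plus 08b per byte, joined and converted to digit ints.
import Mathlib
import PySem

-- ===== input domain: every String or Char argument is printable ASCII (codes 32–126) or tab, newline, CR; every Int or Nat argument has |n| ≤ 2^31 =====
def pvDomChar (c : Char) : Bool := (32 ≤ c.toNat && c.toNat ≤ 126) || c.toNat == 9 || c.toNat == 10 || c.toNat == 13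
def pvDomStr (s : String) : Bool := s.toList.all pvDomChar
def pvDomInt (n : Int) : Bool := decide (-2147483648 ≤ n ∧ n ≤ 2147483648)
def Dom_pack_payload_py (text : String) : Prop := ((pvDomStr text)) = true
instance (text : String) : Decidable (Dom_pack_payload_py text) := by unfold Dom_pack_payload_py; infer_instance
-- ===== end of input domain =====

-- B replaces A's shift-and-mask bit loops with binary string formatting (016b header of the
-- masked length, 08b per byte) and converts the digit characters to ints: idiomatic, same cost.

-- ===== PORT A =====
-- text.encode("utf-8") gives exactly the character codes on the printable-ASCII (plus tab/LF/CR) domain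
def pack_payload_py (text : String) : List Int :=
  let raw := text.toList.map Char.toNat
  let n := raw.length
  let bits := (PySem.List.pyRange 15 (-1) (-1)).foldl
      (fun acc shift => acc ++ [(((n >>> shift.toNat) &&& 1 : Nat) : Int)]) []
  raw.foldl (fun acc byte =>
      (PySem.List.pyRange 7 (-1) (-1)).foldl
        (fun acc2 shift => acc2 ++ [(((byte >>> shift.toNat) &&& 1 : Nat) : Int)]) acc) bits

-- ===== PORT B =====
-- binary digits of v, most significant first, empty for 0 (the digit part of Python's format(v,'b'))
def pvBinRepr : Nat → List Char
  | 0 => []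
  | (v+1) => pvBinRepr ((v+1)/2) ++ [if (v+1) % 2 = 1 then '1' else '0']

-- f"{v:0{w}b}" : binary representation of v left-padded with '0' to width w
def pvPadBin (w v : Nat) : List Char :=
  let ds := if v = 0 then ['0'] else pvBinRepr v
  List.replicate (w - ds.length) '0' ++ ds

def pack_payload_py_alt (text : String) : List Int :=
  let raw := text.toList.map Char.toNat
  let s := pvPadBin 16 (raw.length &&& 0xFFFF) ++ (raw.map (fun b => pvPadBin 8 b)).flatten
  s.map (fun c => ((c.toNat : Int) - 48))   -- int(c), exact since s holds only '0'/'1'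

-- ===== PRECONDITION & SPEC =====
def Spec_pack_payload_py (text : String) (out : List Int) : Prop := out = pack_payload_py_alt text
instance (text : String) (out : List Int) : Decidable (Spec_pack_payload_py text out) := by unfold Spec_pack_payload_py; infer_instance

-- ===== CLAIM (what is proved, stated in full; the proofs are below) =====
def Claim_equal_pack_payload_py : Prop := ∀ (text : String), Dom_pack_payload_py text → Spec_pack_payload_py text (pack_payload_py text)

-- ===== LEMMAS AND PROOFS =====

-- big-endian bits of v, w of them
def pvBitsBE (w v : Nat) : List Int :=
  (List.range w).reverse.map (fun i => (((v >>> i) &&& 1 : Nat) : Int))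

def pvDig (c : Char) : Int := ((c.toNat : Int) - 48)

theorem pvShift_succ (v i : Nat) : v >>> (i + 1) = (v / 2) >>> i := by
  rw [Nat.shiftRight_eq_div_pow, Nat.shiftRight_eq_div_pow, Nat.div_div_eq_div_mul, pow_succ']

theorem pvBitsBE_succ (w v : Nat) :
    pvBitsBE (w + 1) v = pvBitsBE w (v / 2) ++ [((v % 2 : Nat) : Int)] := by
  unfold pvBitsBE
  rw [List.range_succ_eq_map, List.reverse_cons, List.map_append, List.map_reverse,
    List.map_map, ← List.map_reverse]
  refine congrArg₂ (· ++ ·) (List.map_congr_left fun i _ => ?_) ?_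
  · exact congrArg Nat.cast (by rw [Nat.succ_eq_add_one, pvShift_succ])
  · simp only [List.map_cons, List.map_nil, Nat.shiftRight_zero, Nat.and_one_is_mod]

theorem pvPadBin_zero (w : Nat) : pvPadBin (w + 1) 0 = List.replicate (w + 1) '0' := by
  simp [pvPadBin, List.replicate_succ']

theorem pvPadBin_succ (w v : Nat) :
    pvPadBin (w + 2) v = pvPadBin (w + 1) (v / 2) ++ [if v % 2 = 1 then '1' else '0'] := by
  match v with
  | 0 =>
    rw [show (0 : Nat) / 2 = 0 from rfl, pvPadBin_zero, pvPadBin_zero,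
      if_neg (by omega : ¬ (0 : Nat) % 2 = 1)]
    simp [List.replicate_succ']
  | 1 =>
    rw [show (1 : Nat) / 2 = 0 from rfl, pvPadBin_zero, if_pos (by norm_num : (1 : Nat) % 2 = 1)]
    simp [pvPadBin, pvBinRepr, List.replicate_succ']
  | (k+2) =>
    have h2 : (k + 2) / 2 ≠ 0 := by omega
    unfold pvPadBin
    conv_lhs => rw [pvBinRepr]
    simp only [if_neg (by omega : ¬ (k+2) = 0), if_neg h2]
    simp only [Nat.succ_sub_succ, List.append_assoc, List.length_append, List.length_cons,
      List.length_nil]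

theorem pvPadBin_map_dig (w : Nat) : ∀ v : Nat, v < 2 ^ (w + 1) →
    (pvPadBin (w + 1) v).map pvDig = pvBitsBE (w + 1) v := by
  induction w with
  | zero =>
    intro v hv
    interval_cases v <;>
      simp [pvPadBin, pvBinRepr, pvBitsBE, pvDig, List.range_succ]
  | succ w ih =>
    intro v hv
    rw [pvPadBin_succ, pvBitsBE_succ, List.map_append,
      ih (v / 2) (by omega)]
    congr 1
    rcases Nat.mod_two_eq_zero_or_one v with h | h <;> simp [h, pvDig]

theorem pvMask_bit (n i : Nat) (hi : i < 16) :
    (((n &&& 65535) >>> i) &&& 1) = ((n >>> i) &&& 1) := by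
  have h1 : ∀ m : Nat, (m >>> i) &&& 1 = (m.testBit i).toNat := fun m => by
    rw [Nat.toNat_testBit, Nat.shiftRight_eq_div_pow, Nat.and_one_is_mod]
  rw [h1, h1, Nat.testBit_and, show (65535 : Nat) = 2 ^ 16 - 1 by norm_num,
    Nat.testBit_two_pow_sub_one]
  simp [hi]

-- fold that appends one bit per index equals a map
theorem pvFoldl_push {α β : Type} (f : α → β) :
    ∀ (l : List α) (acc : List β), l.foldl (fun a x => a ++ [f x]) acc = acc ++ l.map f := by
  intro l
  induction l with
  | nil => simp
  | cons x xs ih => intro acc; simp [ih]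

theorem pvFoldl_chunks {α β : Type} (G : α → List β) :
    ∀ (l : List α) (acc : List β), l.foldl (fun a x => a ++ G x) acc = acc ++ l.flatMap G := by
  intro l
  induction l with
  | nil => simp
  | cons x xs ih => intro acc; simp [ih]

theorem pvByte_bits (b : Nat) (hb : b < 256) :
    (PySem.List.pyRange 7 (-1) (-1)).map
        (fun sh => (((b >>> sh.toNat) &&& 1 : Nat) : Int))
      = (pvPadBin 8 b).map pvDig := by
  rw [pvPadBin_map_dig 7 b hb]
  have : PySem.List.pyRange 7 (-1) (-1) = [7, 6, 5, 4, 3, 2, 1, 0] := by decide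
  rw [this]
  simp [pvBitsBE, List.range_succ]

theorem pvBody_eq : ∀ (raw : List Nat), (∀ b ∈ raw, b < 256) →
    raw.flatMap (fun byte => (PySem.List.pyRange 7 (-1) (-1)).map
        (fun sh => (((byte >>> sh.toNat) &&& 1 : Nat) : Int)))
      = ((raw.map (pvPadBin 8)).flatten).map pvDig := by
  intro raw
  induction raw with
  | nil => simp
  | cons b bs ih =>
    intro h
    simp only [List.flatMap_cons, List.map_cons, List.flatten_cons, List.map_append]
    rw [pvByte_bits b (h b (by simp)), ih (fun x hx => h x (by simp [hx]))]

theorem pvHeader_eq (n : Nat) :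
    (PySem.List.pyRange 15 (-1) (-1)).map
        (fun sh => (((n >>> sh.toNat) &&& 1 : Nat) : Int))
      = (pvPadBin 16 (n &&& 65535)).map pvDig := by
  rw [pvPadBin_map_dig 15 (n &&& 65535) (Nat.and_lt_two_pow n (by norm_num))]
  have : PySem.List.pyRange 15 (-1) (-1)
      = [15, 14, 13, 12, 11, 10, 9, 8, 7, 6, 5, 4, 3, 2, 1, 0] := by decide
  rw [this]
  simp only [pvBitsBE]
  have : (List.range 16).reverse = [15, 14, 13, 12, 11, 10, 9, 8, 7, 6, 5, 4, 3, 2, 1, 0] := by decide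
  rw [this]
  simp only [List.map_cons, List.map_nil, List.cons.injEq, and_true]
  refine ⟨?_, ?_, ?_, ?_, ?_, ?_, ?_, ?_, ?_, ?_, ?_, ?_, ?_, ?_, ?_, ?_⟩ <;>
    exact congrArg Nat.cast (pvMask_bit n _ (by norm_num)).symm

-- ===== VERDICT (by name: the statement is the Claim_ definition above) =====
theorem pack_payload_py_spec : Claim_equal_pack_payload_py := by
  intro text hdom
  unfold Spec_pack_payload_py pack_payload_py pack_payload_py_alt
  simp only [pvFoldl_push, pvFoldl_chunks, List.nil_append, List.map_append]
  rw [pvHeader_eq, pvBody_eq]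
  · rfl
  · intro b hb
    simp only [List.mem_map] at hb
    obtain ⟨c, hc, rfl⟩ := hb
    have := List.all_eq_true.mp hdom c hc
    simp [pvDomChar] at this
    omega
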